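-- pv_equiv track=rewrite | github.com/gh-arnab21/BDH_interpretability | scripts/precompute_monosemanticity_v1_backup.py | _split_sentence_to_words
-- ===== SOURCE A (Python) =====
-- from typing import Dict, List, Any, Tuple
--
-- def _split_sentence_to_words(sentence: str) -> List[Tuple[str, int, int]]:
--     """
--     Split a sentence into words with their byte-range positions.
--     Returns: [(word, byte_start, byte_end), ...]
--     """
--     words: List[Tuple[str, int, int]] = []
--     byte_pos = 0
--     for word in sentence.split(" "):
--         word_bytes = len(word.encode("utf-8"))
--         words.append((word, byte_pos, byte_pos + word_bytes))
--         byte_pos += word_bytes + 1  # +1 for the space byte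
--     return words
-- ===== SOURCE B (Python) =====
-- from typing import Dict, List, Any, Tuple
--
-- def _split_sentence_to_words(sentence: str) -> List[Tuple[str, int, int]]:
--     """
--     Split a sentence into words with their byte-range positions.
--     Scans the UTF-8 byte string for space bytes and cuts between them,
--     instead of threading a running byte counter through split()'s output.
--     """
--     data = sentence.encode("utf-8")
--     space_pos = [i for i, byte in enumerate(data) if byte == 0x20]
--     bounds = [-1] + space_pos + [len(data)]
--     return [(data[a + 1:b].decode("utf-8"), a + 1, b)
--             for a, b in zip(bounds, bounds[1:])]
-- ===== Notes on version B (the rewrite author's own statement) =====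
-- stated objective: alternative
-- what changed: B scans the UTF-8 byte string once for space-byte positions and cuts the ranges between consecutive boundaries, instead of iterating over the split word list while threading a running byte counter.
import Mathlib
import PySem

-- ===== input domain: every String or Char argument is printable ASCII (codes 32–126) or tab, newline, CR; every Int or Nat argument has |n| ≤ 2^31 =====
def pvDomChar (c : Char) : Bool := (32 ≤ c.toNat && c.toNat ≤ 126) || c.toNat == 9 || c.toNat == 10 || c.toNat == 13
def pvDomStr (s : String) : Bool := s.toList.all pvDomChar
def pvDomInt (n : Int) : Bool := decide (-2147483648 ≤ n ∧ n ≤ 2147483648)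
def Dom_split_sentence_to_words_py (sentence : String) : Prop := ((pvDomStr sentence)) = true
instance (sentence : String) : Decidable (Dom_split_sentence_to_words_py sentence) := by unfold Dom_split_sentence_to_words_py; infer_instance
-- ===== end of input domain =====

-- B replaces A's running-byte-counter walk over split(" ") by one scan of the byte string
-- for space positions and slicing between consecutive boundaries (objective: alternative).

-- ===== PORT A =====
-- for word in sentence.split(" "): append (word, byte_pos, byte_pos+len(word.encode())); byte_pos += len+1
-- len(word.encode("utf-8")) is ported as the character count: exact on the ASCII input domain.
def split_sentence_to_words_py (sentence : String) : List (String × Int × Int) :=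
  ((PySem.Chars.splitOn sentence.toList [' ']).foldl
    (fun (st : List (String × Int × Int) × Int) word =>
      let wb : Int := word.length
      (st.1 ++ [(String.ofList word, st.2, st.2 + wb)], st.2 + wb + 1))
    ([], 0)).1

-- ===== PORT B =====
-- data = sentence.encode("utf-8") is ported as the character list: exact on the ASCII input domain
-- (one byte per character, decode is the inverse).
def split_sentence_to_words_py_alt (sentence : String) : List (String × Int × Int) :=
  let data := sentence.toList
  let spacePos : List Int :=
    (PySem.List.enumerate data 0).filterMap (fun p => if p.2 == ' ' then some p.1 else none)
  let bounds : List Int := [-1] ++ spacePos ++ [(data.length : Int)]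
  (bounds.zip (PySem.List.slice bounds (some 1) none)).map
    (fun p => (String.ofList (PySem.List.slice data (some (p.1 + 1)) (some p.2)), p.1 + 1, p.2))

-- ===== PRECONDITION & SPEC =====
def Spec_split_sentence_to_words_py (sentence : String) (out : List (String × Int × Int)) : Prop := out = split_sentence_to_words_py_alt sentence
instance (sentence : String) (out : List (String × Int × Int)) : Decidable (Spec_split_sentence_to_words_py sentence out) := by unfold Spec_split_sentence_to_words_py; infer_instance

-- ===== CLAIM (what is proved, stated in full; the proofs are below) =====
def Claim_equal_split_sentence_to_words_py : Prop := ∀ (sentence : String), Dom_split_sentence_to_words_py sentence → Spec_split_sentence_to_words_py sentence (split_sentence_to_words_py sentence)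

-- ===== LEMMAS AND PROOFS =====

-- Structural splitting of a char list at spaces (proof-only reference function).
def splitSp : List Char → List (List Char)
  | [] => [[]]
  | c :: cs =>
    if c = ' ' then [] :: splitSp cs
    else
      match splitSp cs with
      | [] => [[c]]
      | w :: ws => (c :: w) :: ws

-- Reference result: words of ws laid out from byte position pos, one space between them.
def gWords : List (List Char) → Int → List (String × Int × Int)
  | [], _ => []
  | w :: ws, pos => (String.ofList w, pos, pos + w.length) :: gWords ws (pos + w.length + 1)

-- The space positions of data, enumerated from byte offset s.
def spacePosL (data : List Char) (s : Int) : List Int :=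
  (PySem.List.enumerate data s).filterMap (fun p => if p.2 == ' ' then some p.1 else none)

-- B's assembly step: slice D between consecutive boundaries.
def bAssemble (D : List Char) (bounds : List Int) : List (String × Int × Int) :=
  (bounds.zip bounds.tail).map
    (fun p => (String.ofList (PySem.List.slice D (some (p.1 + 1)) (some p.2)), p.1 + 1, p.2))

-- prepHead p ws prepends p to the first piece (used to absorb splitOn.go's 'cur' accumulator).
def prepHead (p : List Char) : List (List Char) → List (List Char)
  | [] => [p]
  | w :: ws => (p ++ w) :: ws

theorem splitSp_ne_nil (cs : List Char) : splitSp cs ≠ [] := by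
  cases cs with
  | nil => simp [splitSp]
  | cons c cs =>
    simp only [splitSp]
    split_ifs with h
    · simp
    · cases h2 : splitSp cs <;> simp

theorem splitSp_head_len {cs w : List Char} {ws : List (List Char)}
    (h : splitSp cs = w :: ws) : w.length ≤ cs.length := by
  induction cs generalizing w ws with
  | nil =>
    simp [splitSp] at h
    simp [h.1.symm]
  | cons c cs ih =>
    simp only [splitSp] at h
    split_ifs at h with hc
    · cases h
      simp
    · cases h2 : splitSp cs with
      | nil => exact absurd h2 (splitSp_ne_nil cs)
      | cons w' ws' =>
        rw [h2] at h
        cases h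
        simpa using Nat.succ_le_succ (ih h2)

theorem go_space (l : List Char) : ∀ (fuel : Nat) (cur : List Char) (acc : List (List Char)),
    l.length ≤ fuel →
    PySem.Chars.splitOn.go [' '] fuel l cur acc
      = acc.reverse ++ prepHead cur.reverse (splitSp l) := by
  induction l with
  | nil =>
    intro fuel cur acc _
    cases fuel <;> simp [PySem.Chars.splitOn.go.eq_def, splitSp, prepHead]
  | cons c rest ih =>
    intro fuel cur acc hf
    cases fuel with
    | zero => simp at hf
    | succ f =>
      rw [PySem.Chars.splitOn.go.eq_def]
      simp only [splitSp]
      by_cases hc : c = ' '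
      · subst hc
        rw [if_pos (show ([' '].isPrefixOf (' ' :: rest)) = true by simp [List.isPrefixOf]),
          if_pos rfl]
        simp only [List.length_cons, List.length_nil, List.drop_succ_cons, List.drop_zero]
        rw [ih f [] (cur.reverse :: acc) (by simpa using Nat.le_of_succ_le_succ hf)]
        cases h2 : splitSp rest with
        | nil => exact absurd h2 (splitSp_ne_nil rest)
        | cons w ws => simp [prepHead]
      · rw [if_neg (show ¬ ([' '].isPrefixOf (c :: rest)) = true by
            simp [List.isPrefixOf]; exact fun h => hc h.symm), if_neg hc]
        rw [ih f (c :: cur) acc (by simpa using Nat.le_of_succ_le_succ hf)]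
        cases h2 : splitSp rest with
        | nil => exact absurd h2 (splitSp_ne_nil rest)
        | cons w ws => simp [prepHead]

theorem splitOn_space_eq (cs : List Char) : PySem.Chars.splitOn cs [' '] = splitSp cs := by
  unfold PySem.Chars.splitOn
  rw [go_space cs (cs.length + 1) [] [] (by omega)]
  cases h2 : splitSp cs with
  | nil => exact absurd h2 (splitSp_ne_nil cs)
  | cons w ws => simp [prepHead]

theorem foldA_eq (ws : List (List Char)) (acc : List (String × Int × Int)) (pos : Int) :
    (ws.foldl
      (fun (st : List (String × Int × Int) × Int) word =>
        let wb : Int := word.length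
        (st.1 ++ [(String.ofList word, st.2, st.2 + wb)], st.2 + wb + 1))
      (acc, pos)).1 = acc ++ gWords ws pos := by
  induction ws generalizing acc pos with
  | nil => simp [gWords]
  | cons w ws ih =>
    simp only [List.foldl_cons, gWords]
    rw [ih]
    simp

theorem zipB_eq (pre data : List Char) :
    bAssemble (pre ++ data)
      ((((pre.length : Int) - 1) :: spacePosL data pre.length) ++ [((pre ++ data).length : Int)])
    = gWords (splitSp data) pre.length := by
  induction data generalizing pre with
  | nil =>
    simp only [spacePosL, PySem.List.enumerate, bAssemble, splitSp, gWords,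
      List.append_nil, List.filterMap_nil, List.nil_append, List.cons_append,
      List.zip_cons_cons, List.tail_cons, List.zip_nil_right, List.map_cons, List.map_nil]
    rw [PySem.List.slice_of_nonneg pre (by omega) (by omega) (by simp) (by simp)]
    simp
  | cons c rest ih =>
    have henum : spacePosL (c :: rest) (pre.length : Int)
        = (if c = ' ' then [((pre.length : Int))] else []) ++ spacePosL rest ((pre.length : Int) + 1) := by
      by_cases hc : c = ' ' <;> simp [spacePosL, PySem.List.enumerate, List.filterMap_cons, hc]
    by_cases hc : c = ' '
    · subst hc
      have ihx := ih (pre ++ [' '])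
      rw [show (pre ++ [' ']) ++ rest = pre ++ ' ' :: rest from by simp] at ihx
      rw [show (((pre ++ [' ']).length : Nat) : Int) = (pre.length : Int) + 1 from by simp] at ihx
      rw [henum]
      simp only [if_pos rfl, if_true, List.cons_append, List.nil_append]
      rw [show splitSp (' ' :: rest) = [] :: splitSp rest from by simp [splitSp]]
      simp only [bAssemble, List.zip_cons_cons, List.tail_cons, List.map_cons, gWords]
      congr 1
      · rw [show (pre.length : Int) - 1 + 1 = (pre.length : Int) from by ring]
        rw [PySem.List.slice_of_nonneg (pre ++ ' ' :: rest) (by omega) (by omega)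
          (by simp only [List.length_append, List.length_cons, List.length_nil]; omega)
          (by simp only [List.length_append, List.length_cons, List.length_nil]; omega)]
        simp
      · simpa [bAssemble, show (pre.length : Int) + 1 - 1 = (pre.length : Int) from by ring]
          using ihx
    · have ihx := ih (pre ++ [c])
      rw [show (pre ++ [c]) ++ rest = pre ++ c :: rest from by simp] at ihx
      rw [show (((pre ++ [c]).length : Nat) : Int) = (pre.length : Int) + 1 from by simp] at ihx
      rw [show (pre.length : Int) + 1 - 1 = (pre.length : Int) from by ring] at ihx
      rw [henum]
      simp only [if_neg hc, List.nil_append, List.cons_append]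
      simp only [List.cons_append] at ihx
      obtain ⟨w, ws, h2⟩ : ∃ w ws, splitSp rest = w :: ws := by
        cases h2 : splitSp rest with
        | nil => exact absurd h2 (splitSp_ne_nil rest)
        | cons w ws => exact ⟨w, ws, rfl⟩
      rw [show splitSp (c :: rest) = (c :: w) :: ws from by simp [splitSp, hc, h2]]
      obtain ⟨b1, T', hT⟩ : ∃ b1 T', spacePosL rest ((pre.length : Int) + 1)
          ++ [((pre ++ c :: rest).length : Int)] = b1 :: T' := by
        cases hT : spacePosL rest ((pre.length : Int) + 1)
            ++ [((pre ++ c :: rest).length : Int)] with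
        | nil => exact absurd hT (by simp)
        | cons b1 T' => exact ⟨b1, T', rfl⟩
      rw [hT] at ihx ⊢
      rw [h2] at ihx
      simp only [bAssemble, List.zip_cons_cons, List.tail_cons, List.map_cons, gWords,
        List.cons.injEq, Prod.mk.injEq, String.ofList_inj] at ihx ⊢
      obtain ⟨⟨hw, -, hb1⟩, htail⟩ := ihx
      have hwlen : w.length ≤ rest.length := splitSp_head_len h2
      have hslice : PySem.List.slice (pre ++ c :: rest) (some ((pre.length : Int) - 1 + 1))
          (some b1) = c :: w := by
        rw [show (pre.length : Int) - 1 + 1 = (pre.length : Int) from by ring]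
        rw [PySem.List.slice_of_nonneg (pre ++ c :: rest) (by omega) (by omega)
          (by simp only [List.length_append, List.length_cons]; omega)
          (by simp only [List.length_append, List.length_cons]; omega)]
        rw [PySem.List.slice_of_nonneg (pre ++ c :: rest) (by omega) (by omega)
          (by simp only [List.length_append, List.length_cons]; omega)
          (by simp only [List.length_append, List.length_cons]; omega)] at hw
        rw [show (((pre.length : Int) + 1).toNat) = pre.length + 1 from by omega] at hw
        rw [show pre ++ c :: rest = (pre ++ [c]) ++ rest from by simp] at hw
        rw [List.drop_left' (show (pre ++ [c]).length = pre.length + 1 from by simp)] at hw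
        rw [show ((pre.length : Int)).toNat = pre.length from by omega]
        rw [List.drop_left]
        rw [show b1.toNat - pre.length = (b1.toNat - (pre.length + 1)) + 1 from by omega]
        rw [List.take_succ_cons, hw]
      refine ⟨⟨?_, ?_, ?_⟩, ?_⟩
      · exact hslice
      · ring
      · rw [hb1]; simp only [List.length_cons]; push_cast; ring
      · rw [htail]; congr 1; simp only [List.length_cons]; push_cast; ring

theorem split_sentence_to_words_py_spec' (sentence : String) :
    split_sentence_to_words_py sentence = split_sentence_to_words_py_alt sentence := by
  unfold split_sentence_to_words_py split_sentence_to_words_py_alt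
  simp only [PySem.List.slice_from_one]
  rw [splitOn_space_eq, foldA_eq]
  have h := zipB_eq [] sentence.toList
  simp only [bAssemble, spacePosL, List.nil_append, List.length_nil, Nat.cast_zero,
    zero_sub, List.cons_append, List.tail_cons] at h
  simpa using h.symm

-- ===== VERDICT (by name: the statement is the Claim_ definition above) =====
theorem split_sentence_to_words_py_spec : Claim_equal_split_sentence_to_words_py := by
  intro s _
  exact split_sentence_to_words_py_spec' s
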